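-- pv_equiv track=rewrite | github.com/narpfel/adventofcode | 2015/19/solution.py | possible_with_1_replacement
-- ===== SOURCE A (Python) =====
-- def replace_first(element, replacement, molecule):
--     for i, current in enumerate(molecule):
--         if current == element:
--             molecule[i] = replacement
--             return i
--     raise ValueError("no element")
--
-- def possible_with_1_replacement(origin, replacements):
--     seen = set()
--     for element in replacements:
--         for replacement in replacements[element]:
--             i = 0
--             while 0 <= i < len(origin):
--                 head, tail = origin[:i], origin[i:]
--                 try:
--                     i += replace_first(element, replacement, tail) + 1
--                 except ValueError:
--                     break
--                 seen.add("".join(head + tail))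
--     return seen
-- ===== SOURCE B (Python) =====
-- def possible_with_1_replacement(origin, replacements):
--     seen = set()
--     for element, subs in replacements.items():
--         indices = [i for i, atom in enumerate(origin) if atom == element]
--         for replacement in subs:
--             for i in indices:
--                 seen.add("".join(origin[:i] + [replacement] + origin[i + 1:]))
--     return seen
-- ===== Notes on version B (the rewrite author's own statement) =====
-- stated objective: simpler
-- what changed: B replaces the restarting replace_first scan over mutated tail slices (while loop with try/except control flow) by computing each element's occurrence positions once with a single enumerate pass and building each new molecule directly from slices.
import Mathlib
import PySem

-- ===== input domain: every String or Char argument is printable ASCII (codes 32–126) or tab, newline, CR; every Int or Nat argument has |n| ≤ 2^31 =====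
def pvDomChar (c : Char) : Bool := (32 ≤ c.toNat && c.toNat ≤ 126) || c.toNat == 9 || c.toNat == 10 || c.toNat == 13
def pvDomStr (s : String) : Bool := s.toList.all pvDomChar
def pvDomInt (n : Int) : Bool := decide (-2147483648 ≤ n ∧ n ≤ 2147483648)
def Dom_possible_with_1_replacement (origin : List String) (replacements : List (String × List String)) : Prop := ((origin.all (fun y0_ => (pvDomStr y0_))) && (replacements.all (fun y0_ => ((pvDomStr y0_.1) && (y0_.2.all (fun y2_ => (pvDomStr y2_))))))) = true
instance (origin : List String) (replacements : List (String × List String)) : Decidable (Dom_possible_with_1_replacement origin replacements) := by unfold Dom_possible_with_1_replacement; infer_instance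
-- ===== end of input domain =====

-- B replaces A's restarting replace_first scan over mutated tail slices (while + try/except)
-- by one enumerate pass collecting each element's occurrence positions, then direct slice rebuilding (objective: simpler).


-- ===== PORT A =====
-- replace_first: returns the local index of the first occurrence and the mutated list;
-- none = the ValueError path.
def replaceFirstA (element replacement : String) : List String → Option (Nat × List String)
  | [] => none
  | x :: xs =>
    if x == element then some (0, replacement :: xs)
    else
      match replaceFirstA element replacement xs with
      | none => none
      | some (j, ys) => some (j + 1, x :: ys)

-- the 'while 0 <= i < len(origin)' loop; Python's i is an int that stays ≥ 0, so we carry a Nat.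
-- head = origin[:i] = take i, tail = origin[i:] = drop i (exact: 0 ≤ i ≤ len origin throughout).
def loopA (element replacement : String) (origin : List String) (i : Nat) (seen : PySem.Set String) : PySem.Set String :=
  if i < origin.length then
    match replaceFirstA element replacement (origin.drop i) with
    | none => seen
    | some (j, ys) =>
        loopA element replacement origin (i + j + 1)
          (PySem.Set.add seen (PySem.Str.join "" (origin.take i ++ ys)))
  else seen
termination_by origin.length - i
decreasing_by omega

def possible_with_1_replacement (origin : List String) (replacements : List (String × List String)) : List String :=
  ((PySem.Dict.ofList replacements).items).foldl
    (fun seen er => er.2.foldl (fun seen replacement => loopA er.1 replacement origin 0 seen) seen)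
    PySem.Set.empty

-- ===== PORT B =====
def possible_with_1_replacement_alt (origin : List String) (replacements : List (String × List String)) : List String :=
  ((PySem.Dict.ofList replacements).items).foldl
    (fun seen er =>
      let indices := ((PySem.List.enumerate origin).filter (fun p => p.2 == er.1)).map (fun p => p.1)
      er.2.foldl
        (fun seen replacement =>
          indices.foldl
            (fun seen i =>
              PySem.Set.add seen (PySem.Str.join ""
                (PySem.List.slice origin none (some i) ++ [replacement] ++ PySem.List.slice origin (some (i + 1)) none)))
            seen)
        seen)
    PySem.Set.empty

-- ===== PRECONDITION & SPEC =====
def Spec_possible_with_1_replacement (origin : List String) (replacements : List (String × List String)) (out : List String) : Prop := out = possible_with_1_replacement_alt origin replacements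
instance (origin : List String) (replacements : List (String × List String)) (out : List String) : Decidable (Spec_possible_with_1_replacement origin replacements out) := by unfold Spec_possible_with_1_replacement; infer_instance

-- ===== CLAIM (what is proved, stated in full; the proofs are below) =====
def Claim_equal_possible_with_1_replacement : Prop := ∀ (origin : List String) (replacements : List (String × List String)), Dom_possible_with_1_replacement origin replacements → Spec_possible_with_1_replacement origin replacements (possible_with_1_replacement origin replacements)

-- ===== LEMMAS AND PROOFS =====

-- the occurrence-index list B computes, with an explicit enumerate start
def idxsFrom (e : String) (t : List String) (s : Int) : List Int :=
  ((PySem.List.enumerate t s).filter (fun p => p.2 == e)).map (fun p => p.1)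

lemma idxsFrom_nil (e : String) (s : Int) : idxsFrom e [] s = [] := by
  simp [idxsFrom]

lemma idxsFrom_cons (e x : String) (t : List String) (s : Int) :
    idxsFrom e (x :: t) s = (if x == e then [s] else []) ++ idxsFrom e t (s + 1) := by
  by_cases h : (x == e) = true <;>
    simp [idxsFrom, PySem.List.enumerate_cons, h]

lemma idxsFrom_append (e : String) (a b : List String) (s : Int) :
    idxsFrom e (a ++ b) s = idxsFrom e a s ++ idxsFrom e b (s + a.length) := by
  simp [idxsFrom, PySem.List.enumerate_append]

lemma idxsFrom_of_none (e : String) (a : List String) (h : ∀ x ∈ a, (x == e) = false) :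
    ∀ s, idxsFrom e a s = [] := by
  induction a with
  | nil => intro s; exact idxsFrom_nil e s
  | cons x xs ih =>
    intro s
    rw [idxsFrom_cons, h x (by simp), ih (fun y hy => h y (by simp [hy]))]
    simp

lemma replaceFirstA_none (e r : String) :
    ∀ t : List String, replaceFirstA e r t = none → ∀ x ∈ t, (x == e) = false := by
  intro t
  induction t with
  | nil => intro _ x hx; cases hx
  | cons x xs ih =>
    intro h y hy
    by_cases hx : (x == e) = true
    · simp [replaceFirstA, hx] at h
    · simp only [replaceFirstA, hx, Bool.false_eq_true, if_false] at h
      rw [List.mem_cons] at hy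
      rcases hy with rfl | hy
      · simpa using hx
      · cases hrec : replaceFirstA e r xs with
        | none => exact ih hrec y hy
        | some q => rw [hrec] at h; simp at h

lemma replaceFirstA_some (e r : String) :
    ∀ (t : List String) (p : Nat × List String), replaceFirstA e r t = some p →
      ∃ a b, t = a ++ e :: b ∧ (∀ x ∈ a, (x == e) = false) ∧ p.1 = a.length ∧ p.2 = a ++ r :: b := by
  intro t
  induction t with
  | nil => intro p h; cases h
  | cons x xs ih =>
    intro p h
    by_cases hx : (x == e) = true
    · simp only [replaceFirstA, hx, if_true] at h
      injection h with h
      subst h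
      exact ⟨[], xs, by simp [(beq_iff_eq).1 hx], by simp, rfl, rfl⟩
    · simp only [replaceFirstA, hx, Bool.false_eq_true, if_false] at h
      cases hrec : replaceFirstA e r xs with
      | none => rw [hrec] at h; simp at h
      | some q =>
        rw [hrec] at h
        simp only [Option.some.injEq] at h
        obtain ⟨a, b, hab, hall, h1, h2⟩ := ih q hrec
        refine ⟨x :: a, b, by simp [hab], ?_, ?_, ?_⟩
        · intro y hy
          rw [List.mem_cons] at hy
          rcases hy with rfl | hy
          · simpa using hx
          · exact hall y hy
        · rw [← h]; simp [h1]
        · rw [← h]; simp [h2]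

lemma loopA_eq_fold (e r : String) (origin : List String) :
    ∀ (n : Nat) (t : List String), t.length ≤ n → ∀ (i : Nat), origin.drop i = t → i ≤ origin.length →
      ∀ seen, loopA e r origin i seen
        = (idxsFrom e t (i : Int)).foldl
            (fun s k => PySem.Set.add s (PySem.Str.join ""
              (PySem.List.slice origin none (some k) ++ [r] ++ PySem.List.slice origin (some (k + 1)) none)))
            seen := by
  intro n
  induction n with
  | zero =>
    intro t ht i hdrop hi seen
    have ht0 : t = [] := List.length_eq_zero_iff.mp (Nat.le_zero.mp ht)
    subst ht0
    rw [idxsFrom_nil]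
    rw [loopA]
    have : ¬ i < origin.length := by
      have := List.drop_eq_nil_iff.mp hdrop
      omega
    simp [this]
  | succ n ih =>
    intro t ht i hdrop hi seen
    cases hrf : replaceFirstA e r t with
    | none =>
      have hall := replaceFirstA_none e r t hrf
      rw [idxsFrom_of_none e t hall]
      rw [loopA, hdrop, hrf]
      simp
    | some p =>
      obtain ⟨j, ys⟩ := p
      obtain ⟨a, b, heq, hall, hj, hys⟩ := replaceFirstA_some e r t (j, ys) hrf
      simp only at hj hys
      subst heq hj hys
      have hblen : b.length ≤ n := by
        have := ht; simp [List.length_append] at this; omega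
      have hlt : i < origin.length := by
        by_contra hc
        have hnil : origin.drop i = [] := List.drop_eq_nil_iff.mpr (by omega)
        rw [hdrop] at hnil; simp at hnil
      have horigin : origin = (origin.take i ++ a) ++ e :: b := by
        conv_lhs => rw [← List.take_append_drop i origin]
        rw [hdrop]; simp
      have hPlen : (origin.take i ++ a).length = i + a.length := by
        simp [List.length_take]; omega
      have htake : origin.take (i + a.length) = origin.take i ++ a := by
        conv_lhs => rw [horigin]
        exact List.take_left' hPlen
      have hdropb : origin.drop (i + a.length + 1) = b := by
        conv_lhs => rw [horigin, show (origin.take i ++ a) ++ e :: b = ((origin.take i ++ a) ++ [e]) ++ b by simp]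
        exact List.drop_left' (by simp [List.length_append, List.length_take]; omega)
      have hlen2 : origin.length = i + a.length + 1 + b.length := by
        have := congrArg List.length horigin
        simp [List.length_append, List.length_take] at this
        omega
      have hidx : idxsFrom e (a ++ e :: b) (i : Int)
          = ((i + a.length : Nat) : Int) :: idxsFrom e b ((i + a.length + 1 : Nat) : Int) := by
        rw [idxsFrom_append, idxsFrom_of_none e a hall, idxsFrom_cons]
        have h1 : (i : Int) + (a.length : Nat) = ((i + a.length : Nat) : Int) := by push_cast; ring
        have h3 : ((i + a.length : Nat) : Int) + 1 = ((i + a.length + 1 : Nat) : Int) := by push_cast; ring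
        rw [h1, h3]
        simp
      have hslice1 : PySem.List.slice origin none (some ((i + a.length : Nat) : Int)) = origin.take i ++ a := by
        rw [PySem.List.slice_to_natCast, htake]
      have hslice2 : PySem.List.slice origin (some (((i + a.length : Nat) : Int) + 1)) none = b := by
        have h3 : ((i + a.length : Nat) : Int) + 1 = ((i + a.length + 1 : Nat) : Int) := by push_cast; ring
        rw [h3, PySem.List.slice_from_natCast, hdropb]
      rw [hidx]
      simp only [List.foldl_cons]
      rw [loopA, if_pos hlt, hdrop, hrf]
      have hstr : origin.take i ++ (a ++ r :: b)
          = PySem.List.slice origin none (some ((i + a.length : Nat) : Int)) ++ [r]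
            ++ PySem.List.slice origin (some (((i + a.length : Nat) : Int) + 1)) none := by
        rw [hslice1, hslice2]; simp
      rw [← hstr]
      exact ih b hblen (i + a.length + 1) hdropb (by omega) _

theorem possible_with_1_replacement_spec : Claim_equal_possible_with_1_replacement := by
  unfold Claim_equal_possible_with_1_replacement
  intro origin replacements _
  unfold Spec_possible_with_1_replacement
  unfold possible_with_1_replacement possible_with_1_replacement_alt
  apply List.foldl_ext
  intro seen er _
  apply List.foldl_ext
  intro s rep _
  have h := loopA_eq_fold er.1 rep origin origin.length origin le_rfl 0 rfl (Nat.zero_le _) s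
  simp only at h
  rw [h]
  simp [idxsFrom]
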